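-- pv_equiv track=rewrite | github.com/secretdsy/Programmers | level2/heap/42626__76.py | solution
-- ===== SOURCE A (Python) =====
-- def solution(scoville, K):
--     answer = 0
--     while(1):
--         scoville.sort(reverse=True)
--         if(scoville[-1] > K):
--             return answer
--         elif(len(scoville) == 1):
--             return -1
--         else:
--             a=scoville.pop()
--             b=scoville.pop()
--             scoville.append(a + 2 * b)
--             answer+=1
--
--     return -1
-- ===== SOURCE B (Python) =====
-- def solution(scoville, K):
--     # Sort once (descending, min at the tail); each round pops the two smallest
--     # in O(1) from the tail and re-inserts the mixed value by binary search,
--     # instead of re-sorting the whole list every round.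
--     s = sorted(scoville, reverse=True)
--     answer = 0
--     while True:
--         if s[-1] > K:
--             return answer
--         if len(s) == 1:
--             return -1
--         a = s.pop()
--         b = s.pop()
--         x = a + 2 * b
--         # binary search: leftmost index where s[i] <= x (s is descending)
--         lo, hi = 0, len(s)
--         while lo < hi:
--             mid = (lo + hi) // 2
--             if s[mid] > x:
--                 lo = mid + 1
--             else:
--                 hi = mid
--         s.insert(lo, x)
--         answer += 1
-- ===== Notes on version B (the rewrite author's own statement) =====
-- stated objective: faster
-- what changed: A re-sorts the whole list on every mixing round; B sorts once (descending), pops the two smallest in O(1) from the tail each round and re-inserts the mixed value at a position found by a hand-written binary search.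
import Mathlib
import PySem

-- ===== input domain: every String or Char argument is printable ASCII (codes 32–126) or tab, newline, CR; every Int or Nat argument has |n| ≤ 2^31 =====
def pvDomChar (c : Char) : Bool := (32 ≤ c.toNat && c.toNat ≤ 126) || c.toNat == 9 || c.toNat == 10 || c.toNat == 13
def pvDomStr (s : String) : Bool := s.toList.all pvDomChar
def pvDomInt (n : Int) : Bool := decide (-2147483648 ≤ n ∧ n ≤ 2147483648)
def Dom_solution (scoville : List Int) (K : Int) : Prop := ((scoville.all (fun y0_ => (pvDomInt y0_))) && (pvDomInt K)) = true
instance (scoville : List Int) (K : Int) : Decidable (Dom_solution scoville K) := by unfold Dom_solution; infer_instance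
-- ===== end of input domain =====

-- B replaces A's full re-sort of the list in every round by one initial sort plus a
-- binary-search re-insertion of each mixed value (measured faster).
-- Python A mutates its list argument in place (sorts, pops, appends) while Python B works
-- on a fresh sorted copy and does not; the equivalence proved here is about the RETURN
-- value only.

-- ===== PORT A =====
-- One iteration of A's 'while(1)' loop: re-sort descending, test scoville[-1]
-- (= getLast?.getD, exact: the 'if t = []' guard is Python's IndexError case, outside Pre_),
-- pop twice from the end (= getLast?/dropLast, exact on the nonempty lists reached here),
-- append the mix and loop.  The fuel argument (= list length, which shrinks by 1 per
-- round) only makes the recursion structural; it is never exhausted on a nonempty list.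
def solutionLoopA : Nat → Int → List Int → Int → Int
  | 0, _, _, _ => 0            -- reached only for the empty list (outside Pre_)
  | fuel + 1, K, s, ans =>
    let t := PySem.List.sorted s (fun x => x) true
    if t = [] then 0           -- scoville[-1] on the empty list: IndexError, outside Pre_
    else
      let a := t.getLast?.getD 0
      if a > K then ans
      else if t.length = 1 then -1
      else
        let t1 := t.dropLast
        let b := t1.getLast?.getD 0   -- second pop; in range since t.length ≥ 2 here
        solutionLoopA fuel K (t1.dropLast ++ [a + 2 * b]) (ans + 1)

def solution (scoville : List Int) (K : Int) : Int :=
  solutionLoopA scoville.length K scoville 0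

-- ===== PORT B =====
-- Source B's hand-written binary search: leftmost index i in the DESCENDING list s with s[i] ≤ x.
-- s[mid] is ported as s.getD mid 0, exact here because lo < hi ≤ len(s) keeps mid in range;
-- Source B's 'mid' is written out as (lo + hi) / 2 (same value, same steps).  The fuel
-- (= list length ≥ hi - lo, which shrinks each probe) only makes the recursion structural.
def bsLoop : Nat → List Int → Int → Nat → Nat → Nat
  | 0, _, _, lo, _ => lo
  | fuel + 1, s, x, lo, hi =>
    if lo < hi then
      if s.getD ((lo + hi) / 2) 0 > x then bsLoop fuel s x ((lo + hi) / 2 + 1) hi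
      else bsLoop fuel s x lo ((lo + hi) / 2)
    else lo

-- One iteration of Source B's loop: no re-sort; s stays descending, the two smallest are
-- popped from the tail (getLast?/dropLast, exact as in port A) and the mixed value is
-- put back at the binary-search position (s.insert(lo, x) = PySem.List.insert).
def solutionLoopB : Nat → Int → List Int → Int → Int
  | 0, _, _, _ => 0            -- reached only for the empty list (outside Pre_)
  | fuel + 1, K, s, ans =>
    if s = [] then 0           -- s[-1] on the empty list: IndexError, outside Pre_
    else
      let a := s.getLast?.getD 0
      if a > K then ans
      else if s.length = 1 then -1
      else
        let s1 := s.dropLast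
        let b := s1.getLast?.getD 0
        let s2 := s1.dropLast
        let x := a + 2 * b
        let i := bsLoop s2.length s2 x 0 s2.length
        solutionLoopB fuel K (PySem.List.insert s2 (i : Int) x) (ans + 1)

def solution_alt (scoville : List Int) (K : Int) : Int :=
  let s := PySem.List.sorted scoville (fun x => x) true
  solutionLoopB s.length K s 0

-- ===== PRECONDITION & SPEC =====
-- Pre_ excludes only the empty list, on which Python A raises IndexError at scoville[-1].
def Pre_solution (scoville : List Int) (K : Int) : Prop := scoville ≠ []
instance (scoville : List Int) (K : Int) : Decidable (Pre_solution scoville K) := by unfold Pre_solution; infer_instance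
def pvWitness_solution : List Int × Int := ([1, 2, 3, 9, 10, 12], 7)

def Spec_solution (scoville : List Int) (K : Int) (out : Int) : Prop := out = solution_alt scoville K
instance (scoville : List Int) (K : Int) (out : Int) : Decidable (Spec_solution scoville K out) := by unfold Spec_solution; infer_instance

-- ===== CLAIM (what is proved, stated in full; the proofs are below) =====
def Claim_equal_solution : Prop := ∀ (scoville : List Int) (K : Int), Dom_solution scoville K → Pre_solution scoville K → Spec_solution scoville K (solution scoville K)

-- ===== LEMMAS AND PROOFS =====

-- descending order, as maintained by B's list
def Desc (l : List Int) : Prop := List.Pairwise (fun a b => b ≤ a) l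

lemma desc_unique {l₁ l₂ : List Int} (h₁ : Desc l₁) (h₂ : Desc l₂) (hp : l₁.Perm l₂) : l₁ = l₂ :=
  List.eq_of_perm_of_sorted (fun _ _ _ _ hab hba => le_antisymm hba hab) h₁ h₂ hp

-- binary-search specification on a descending list
lemma bsLoop_spec (s : List Int) (hdesc : Desc s) (x : Int) :
    ∀ fuel lo hi, hi - lo ≤ fuel → lo ≤ hi → hi ≤ s.length →
    (∀ j (hj : j < s.length), j < lo → x < s[j]) →
    (∀ j (hj : j < s.length), hi ≤ j → s[j] ≤ x) →
    (lo ≤ bsLoop fuel s x lo hi ∧ bsLoop fuel s x lo hi ≤ hi ∧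
      (∀ j (hj : j < s.length), j < bsLoop fuel s x lo hi → x < s[j]) ∧
      (∀ j (hj : j < s.length), bsLoop fuel s x lo hi ≤ j → s[j] ≤ x)) := by
  have hmono : ∀ p q (hq : q < s.length) (hpq : p ≤ q), s[q] ≤ s[p]'(by omega) := by
    intro p q hq hpq
    rcases Nat.lt_or_ge p q with h | h
    · exact (List.pairwise_iff_getElem.mp hdesc) p q (by omega) hq h
    · have : p = q := by omega
      subst this; rfl
  intro fuel
  induction fuel with
  | zero =>
    intro lo hi hf hle hhi hlo hhi2
    have : lo = hi := by omega
    subst this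
    exact ⟨le_refl _, le_refl _, fun j hj hji => hlo j hj hji, fun j hj hij => hhi2 j hj hij⟩
  | succ n ih =>
    intro lo hi hf hle hhi hlo hhi2
    rw [bsLoop]
    by_cases h : lo < hi
    · simp only [h, if_true]
      have hmlt : (lo + hi) / 2 < hi := by omega
      have hmge : lo ≤ (lo + hi) / 2 := by omega
      have hmlen : (lo + hi) / 2 < s.length := by omega
      have hget : s.getD ((lo + hi) / 2) 0 = s[(lo + hi) / 2] := List.getD_eq_getElem s 0 hmlen
      by_cases hc : s.getD ((lo + hi) / 2) 0 > x
      · simp only [hc, if_true]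
        have := ih ((lo + hi) / 2 + 1) hi (by omega) (by omega) hhi
          (by
            intro j hj hjlt
            have hms : s[j] ≥ s[(lo + hi) / 2] := hmono j ((lo + hi) / 2) hmlen (by omega)
            rw [hget] at hc; omega)
          hhi2
        exact ⟨by omega, this.2.1, this.2.2.1, this.2.2.2⟩
      · simp only [hc, if_false]
        have := ih lo ((lo + hi) / 2) (by omega) (by omega) (by omega) hlo
          (by
            intro j hj hij
            have hms : s[j] ≤ s[(lo + hi) / 2] := hmono ((lo + hi) / 2) j hj hij
            rw [hget] at hc; omega)
        exact ⟨this.1, by omega, this.2.2.1, this.2.2.2⟩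
    · simp only [h, if_false]
      have : lo = hi := by omega
      subst this
      exact ⟨le_refl _, le_refl _, fun j hj hji => hlo j hj hji, fun j hj hij => hhi2 j hj hij⟩

-- inserting at the binary-search position keeps the list descending and is a permutation of x :: s
lemma insert_bs_desc (s : List Int) (hdesc : Desc s) (x : Int) :
    Desc (PySem.List.insert s ((bsLoop s.length s x 0 s.length : Nat) : Int) x) ∧
    (PySem.List.insert s ((bsLoop s.length s x 0 s.length : Nat) : Int) x).Perm (x :: s) := by
  obtain ⟨-, hle, hbefore, hafter⟩ := bsLoop_spec s hdesc x s.length 0 s.length (by omega)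
    (by omega) (le_refl _) (by omega) (by intro j hj h; omega)
  set i := bsLoop s.length s x 0 s.length with hi
  rw [PySem.List.insert_natCast s i x hle]
  constructor
  · rw [Desc, List.pairwise_append]
    refine ⟨List.Pairwise.sublist (List.take_sublist i s) hdesc, ?_, ?_⟩
    · rw [List.pairwise_cons]
      refine ⟨?_, List.Pairwise.sublist (List.drop_sublist i s) hdesc⟩
      intro b hb
      obtain ⟨j, hj, hjs⟩ := List.getElem_of_mem hb
      rw [List.getElem_drop] at hjs
      have hlend : (List.drop i s).length = s.length - i := List.length_drop
      have := hafter (i + j) (by omega) (by omega)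
      omega
    · intro a ha b hb
      obtain ⟨j, hj, hjs⟩ := List.getElem_of_mem ha
      rw [List.getElem_take] at hjs
      have hlent : (List.take i s).length = min i s.length := List.length_take
      have hjlen : j < s.length := by omega
      have hxa : x < a := by
        have := hbefore j hjlen (by omega)
        omega
      rcases List.mem_cons.mp hb with rfl | hb'
      · omega
      · obtain ⟨k, hk, hks⟩ := List.getElem_of_mem hb'
        rw [List.getElem_drop] at hks
        have hlend : (List.drop i s).length = s.length - i := List.length_drop
        have := hafter (i + k) (by omega) (by omega)
        omega
  · calc (List.take i s ++ x :: List.drop i s).Perm (x :: (List.take i s ++ List.drop i s)) := List.perm_middle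
      _ = x :: s := by rw [List.take_append_drop]

-- the main invariant: A's loop on any list equals B's loop on its descending sort,
-- run with the same (sufficient) fuel
lemma loop_eq (K : Int) : ∀ n (s l : List Int) (ans : Int), s.length ≤ n → Desc l → l.Perm s →
    solutionLoopA n K s ans = solutionLoopB n K l ans := by
  intro n
  induction n with
  | zero => intro s l ans _ _ _; rfl
  | succ n ih =>
    intro s l ans hlen hdesc hperm
    have hteq : PySem.List.sorted s (fun x => x) true = l := by
      apply desc_unique (PySem.List.sorted_pairwise_rev s (fun x => x)) hdesc
      exact (PySem.List.sorted_perm s (fun x => x) true).trans hperm.symm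
    rw [solutionLoopA, solutionLoopB]
    simp only [hteq]
    by_cases hne : l = []
    · simp [hne]
    · simp only [hne, if_false]
      by_cases ha : l.getLast?.getD 0 > K
      · simp [ha]
      · simp only [ha, if_false]
        by_cases h1 : l.length = 1
        · simp [h1]
        · simp only [h1, if_false]
          have h2 : 2 ≤ l.length := by
            have h0 : l.length ≠ 0 := fun h => hne (List.length_eq_zero_iff.mp h)
            omega
          have hls : l.length = s.length := hperm.length_eq
          have hdesc2 : Desc l.dropLast.dropLast :=
            ((hdesc.sublist (List.dropLast_sublist l)).sublist (List.dropLast_sublist _))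
          obtain ⟨hD, hP⟩ := insert_bs_desc l.dropLast.dropLast hdesc2
            (l.getLast?.getD 0 + 2 * l.dropLast.getLast?.getD 0)
          apply ih
          · simp only [List.length_append, List.length_dropLast, List.length_singleton]
            omega
          · exact hD
          · refine hP.trans ?_
            exact (List.perm_append_singleton _ _).symm

-- ===== VERDICT (by name: the statement is the Claim_ definition above) =====
theorem solution_spec : Claim_equal_solution := by
  intro scoville K _hdom _hpre
  unfold Spec_solution solution solution_alt
  simp only [PySem.List.length_sorted]
  exact loop_eq K scoville.length scoville (PySem.List.sorted scoville (fun x => x) true) 0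
    (le_refl _) (PySem.List.sorted_pairwise_rev scoville (fun x => x))
    (PySem.List.sorted_perm scoville (fun x => x) true)
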